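-- pv_equiv track=rewrite | github.com/MrBrantCode/unitest_baseline | mut_generate/mist_train_taco/taco_11142/solution.py | find_longest_desc_arithmetic_string
-- ===== SOURCE A (Python) =====
-- def find_longest_desc_arithmetic_string(s: str) -> str:
--     cnt = [0] * 26
--     for c in s:
--         cnt[ord(c) - ord('A')] += 1
--
--     a = ['#'] * 26
--     for i in range(26):
--         if cnt[i] > 0:
--             a[i] = chr(ord('A') + i)
--
--     ans = ''
--     diff = 2000
--
--     for i in range(25, -1, -1):
--         if a[i] == '#':
--             continue
--         for j in range(1, 26):
--             c = ''
--             for k in range(i, -1, -j):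
--                 if a[k] == '#':
--                     break
--                 c += a[k]
--             if len(c) > len(ans) or (len(c) == len(ans) and diff > j):
--                 ans = c
--                 diff = j
--
--     return ans
-- ===== SOURCE B (Python) =====
-- def find_longest_desc_arithmetic_string(s: str) -> str:
--     present = [False] * 26
--     for c in s:
--         present[ord(c) - ord('A')] = True
--
--     # L[j][i] = length of the run i, i-j, i-2j, ... of present letters (0 if i absent)
--     L = [[0] * 26]
--     for j in range(1, 26):
--         row = [0] * 26
--         for i in range(26):
--             if present[i]:
--                 row[i] = row[i - j] + 1 if i >= j else 1
--         L.append(row)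
--
--     best_len, best_j, best_i = 0, 2000, 0
--     for i in range(25, -1, -1):
--         if not present[i]:
--             continue
--         for j in range(1, 26):
--             l = L[j][i]
--             if l > best_len or (l == best_len and best_j > j):
--                 best_len, best_j, best_i = l, j, i
--
--     return ''.join(chr(ord('A') + best_i - t * best_j) for t in range(best_len))
-- ===== Notes on version B (the rewrite author's own statement) =====
-- stated objective: alternative
-- what changed: B replaces A's innermost run-building loop (which rebuilds each candidate string character by character for every start/step pair) by 25 precomputed DP run-length rows L[j][i] = 1 + L[j][i-j], selects the best (length, step, start) triple as integers with the same priority, and renders the answer string once at the end.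
import Mathlib
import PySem

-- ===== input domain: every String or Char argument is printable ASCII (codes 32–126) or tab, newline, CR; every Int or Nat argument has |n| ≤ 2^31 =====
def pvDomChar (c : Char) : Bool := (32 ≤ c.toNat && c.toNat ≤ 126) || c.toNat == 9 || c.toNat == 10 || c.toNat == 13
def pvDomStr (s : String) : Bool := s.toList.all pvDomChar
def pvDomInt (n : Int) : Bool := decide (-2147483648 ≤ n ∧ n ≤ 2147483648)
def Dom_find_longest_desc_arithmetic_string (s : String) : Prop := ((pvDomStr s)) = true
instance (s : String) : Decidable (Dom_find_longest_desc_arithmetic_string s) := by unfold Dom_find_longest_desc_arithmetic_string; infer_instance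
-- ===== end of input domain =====

-- B replaces A's innermost run-building loop by 25 precomputed DP run-length rows and renders the
-- answer string once at the end (objective: alternative decomposition; same asymptotic cost).

-- ===== PORT A =====

-- cnt = [0]*26; for c in s: cnt[ord(c) - 65] += 1   (none = IndexError)
def pvACount (cs : List Char) : Option (List Int) :=
  cs.foldl
    (fun acc c => acc.bind (fun cnt =>
      match PySem.List.pyGet? cnt ((c.toNat : Int) - 65) with
      | none => none
      | some v => PySem.List.pySet? cnt ((c.toNat : Int) - 65) (v + 1)))
    (some (List.replicate 26 (0 : Int)))

-- a = ['#']*26; for i in range(26): if cnt[i] > 0: a[i] = chr(65 + i)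
-- (indices i are literally 0..25, in range: pyGetD/pySetD are exact here)
def pvABuildA (cnt : List Int) : List Char :=
  (PySem.List.pyRange 0 26 1).foldl
    (fun a i =>
      if PySem.List.pyGetD cnt i 0 > 0 then PySem.List.pySetD a i (Char.ofNat (65 + i).toNat) else a)
    (List.replicate 26 '#')

-- c = ''; for k in range(i, -1, -j): if a[k] == '#': break ; c += a[k]
-- (k stays in 0..i ⊆ 0..25, in range: pyGetD is exact here; the Bool is the break flag)
def pvARun (a : List Char) (i j : Int) : List Char :=
  ((PySem.List.pyRange i (-1) (-j)).foldl
    (fun (st : List Char × Bool) k =>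
      if st.2 then st
      else if PySem.List.pyGetD a k '#' = '#' then (st.1, true)
      else (st.1 ++ [PySem.List.pyGetD a k '#'], false))
    ([], false)).1

def find_longest_desc_arithmetic_string (s : String) : String :=
  match pvACount s.toList with
  | none => ""        -- Python raises IndexError here; excluded by Pre_
  | some cnt =>
    let a := pvABuildA cnt
    let st := (PySem.List.pyRange 25 (-1) (-1)).foldl
      (fun (st : List Char × Int) i =>
        if PySem.List.pyGetD a i '#' = '#' then st
        else (PySem.List.pyRange 1 26 1).foldl
          (fun (st : List Char × Int) j =>
            let c := pvARun a i j
            if c.length > st.1.length ∨ (c.length = st.1.length ∧ st.2 > j) then (c, j) else st)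
          st)
      ([], 2000)
    String.mk st.1

-- ===== PORT B =====

-- present = [False]*26; for c in s: present[ord(c) - 65] = True   (none = IndexError)
def pvBPresent (cs : List Char) : Option (List Bool) :=
  cs.foldl
    (fun acc c => acc.bind (fun p => PySem.List.pySet? p ((c.toNat : Int) - 65) true))
    (some (List.replicate 26 false))

-- row = [0]*26; for i in range(26): if present[i]: row[i] = row[i-j]+1 if i >= j else 1
-- (indices are in range under the guards: pyGetD/pySetD are exact here)
def pvBRow (p : List Bool) (j : Int) : List Int :=
  (PySem.List.pyRange 0 26 1).foldl
    (fun row i =>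
      if PySem.List.pyGetD p i false then
        PySem.List.pySetD row i (if j ≤ i then PySem.List.pyGetD row (i - j) 0 + 1 else 1)
      else row)
    (List.replicate 26 (0 : Int))

-- L = [[0]*26]; for j in range(1, 26): L.append(row_j)
def pvBTables (p : List Bool) : List (List Int) :=
  (PySem.List.pyRange 1 26 1).foldl (fun L j => L ++ [pvBRow p j]) [List.replicate 26 (0 : Int)]

-- best_len, best_j, best_i selection loop (state is the triple, in that order)
def pvBSelect (p : List Bool) (L : List (List Int)) : Int × Int × Int :=
  (PySem.List.pyRange 25 (-1) (-1)).foldl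
    (fun (st : Int × Int × Int) i =>
      if PySem.List.pyGetD p i false = false then st
      else (PySem.List.pyRange 1 26 1).foldl
        (fun (st : Int × Int × Int) j =>
          let l := PySem.List.pyGetD (PySem.List.pyGetD L j []) i 0
          if l > st.1 ∨ (l = st.1 ∧ st.2.1 > j) then (l, j, i) else st)
        st)
    (0, 2000, 0)

def find_longest_desc_arithmetic_string_alt (s : String) : String :=
  match pvBPresent s.toList with
  | none => ""        -- Python raises IndexError here; excluded by Pre_
  | some p =>
    let L := pvBTables p
    let b := pvBSelect p L
    -- ''.join of chr(65 + best_i - t*best_j) for t in range(best_len); chr is exact here: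
    -- whenever best_len > 0 the argument is provably in 65..90
    String.mk ((PySem.List.pyRange 0 b.1 1).map (fun t => Char.ofNat (65 + b.2.2 - t * b.2.1).toNat))

-- ===== PRECONDITION & SPEC =====
-- Pre_ excludes exactly the inputs where the Python A raises IndexError (a character whose
-- code minus 65 falls outside -26..25, i.e. a code outside 39..90); B raises there as well.
def Pre_find_longest_desc_arithmetic_string (s : String) : Prop :=
  (s.toList.all (fun c => 39 ≤ c.toNat && c.toNat ≤ 90)) = true
instance (s : String) : Decidable (Pre_find_longest_desc_arithmetic_string s) := by
  unfold Pre_find_longest_desc_arithmetic_string; infer_instance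

def pvWitness_find_longest_desc_arithmetic_string : String := "ACB"

def Spec_find_longest_desc_arithmetic_string (s : String) (out : String) : Prop :=
  out = find_longest_desc_arithmetic_string_alt s
instance (s : String) (out : String) : Decidable (Spec_find_longest_desc_arithmetic_string s out) := by
  unfold Spec_find_longest_desc_arithmetic_string; infer_instance

-- ===== CLAIM (what is proved, stated in full; the proofs are below) =====
def Claim_equal_find_longest_desc_arithmetic_string : Prop :=
  ∀ (s : String), Dom_find_longest_desc_arithmetic_string s →
    Pre_find_longest_desc_arithmetic_string s →
    Spec_find_longest_desc_arithmetic_string s (find_longest_desc_arithmetic_string s)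

-- ===== LEMMAS AND PROOFS =====

-- run length of the descending arithmetic chain i, i-j, i-2j, … of present letters
def pvRL (p : List Bool) (j : Nat) (i : Nat) : Nat :=
  if h : j = 0 then 0
  else if p.getD i false then (if j ≤ i then pvRL p j (i - j) + 1 else 1) else 0
termination_by i

-- the string a run (length n, step j, start i) denotes
def pvRender (n : Nat) (j i : Int) : List Char :=
  (List.range n).map (fun (t : Nat) => Char.ofNat (65 + i - (t : Int) * j).toNat)

lemma pvRender_length (n : Nat) (j i : Int) : (pvRender n j i).length = n := by
  simp [pvRender]

lemma pvRender_succ (n : Nat) (j i : Int) :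
    pvRender (n + 1) j i = Char.ofNat (65 + i).toNat :: pvRender n j (i - j) := by
  unfold pvRender
  rw [List.range_succ_eq_map]
  rw [List.map_cons, List.map_map]
  congr 1
  · norm_num
  · apply List.map_congr_left
    intro t _
    simp only [Function.comp]
    congr 2
    push_cast
    ring

-- Python index normalisation for a length-26 list
def pvNorm (i : Int) : Nat := if 0 ≤ i then i.toNat else 26 - (-i).toNat

lemma pvNorm_lt (i : Int) (h1 : -26 ≤ i) (h2 : i < 26) : pvNorm i < 26 := by
  unfold pvNorm; split <;> omega

lemma pvIdx_26 (i : Int) (h1 : -26 ≤ i) (h2 : i < 26) :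
    PySem.List.pyIdx? 26 i = some (pvNorm i) := by
  simp only [PySem.List.pyIdx?, pvNorm]
  split_ifs <;> simp_all

lemma pvGet_26 {α : Type} (xs : List α) (hx : xs.length = 26) (i : Int)
    (h1 : -26 ≤ i) (h2 : i < 26) (d : α) :
    PySem.List.pyGet? xs i = some (xs.getD (pvNorm i) d) := by
  have hn := pvNorm_lt i h1 h2
  simp [PySem.List.pyGet?, hx, pvIdx_26 i h1 h2, List.getD_eq_getElem?_getD,
    List.getElem?_eq_getElem (by omega : pvNorm i < xs.length)]

lemma pvSet_26 {α : Type} (xs : List α) (hx : xs.length = 26) (i : Int)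
    (h1 : -26 ≤ i) (h2 : i < 26) (v : α) :
    PySem.List.pySet? xs i v = some (xs.set (pvNorm i) v) := by
  simp [PySem.List.pySet?, hx, pvIdx_26 i h1 h2]

-- count/presence sync
def pvRel (cnt : List Int) (p : List Bool) : Prop :=
  cnt.length = 26 ∧ p.length = 26 ∧
    ∀ k, (0 < cnt.getD k 0 ↔ p.getD k false = true) ∧ 0 ≤ cnt.getD k 0

lemma pvStage1_aux :
    ∀ (cs : List Char), (∀ c ∈ cs, 39 ≤ c.toNat ∧ c.toNat ≤ 90) →
    ∀ (cnt : List Int) (p : List Bool), pvRel cnt p →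
    ∃ cnt' p',
      cs.foldl (fun acc c => acc.bind (fun cnt =>
        match PySem.List.pyGet? cnt ((c.toNat : Int) - 65) with
        | none => none
        | some v => PySem.List.pySet? cnt ((c.toNat : Int) - 65) (v + 1))) (some cnt) = some cnt' ∧
      cs.foldl (fun acc c => acc.bind (fun p => PySem.List.pySet? p ((c.toNat : Int) - 65) true))
        (some p) = some p' ∧
      pvRel cnt' p'
  | [], _, cnt, p, hr => ⟨cnt, p, rfl, rfl, hr⟩
  | c :: cs, h, cnt, p, hr => by
    obtain ⟨hla, hlp, hk⟩ := hr
    have hc := h c (List.mem_cons_self ..)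
    have h1 : -26 ≤ (c.toNat : Int) - 65 := by omega
    have h2 : (c.toNat : Int) - 65 < 26 := by omega
    have hm : pvNorm ((c.toNat : Int) - 65) < 26 := pvNorm_lt _ h1 h2
    have hrec : pvRel (cnt.set (pvNorm ((c.toNat : Int) - 65))
        (cnt.getD (pvNorm ((c.toNat : Int) - 65)) 0 + 1))
        (p.set (pvNorm ((c.toNat : Int) - 65)) true) := by
      refine ⟨by simp [hla], by simp [hlp], fun k => ?_⟩
      by_cases hkm : pvNorm ((c.toNat : Int) - 65) = k
      · subst hkm
        have := hk (pvNorm ((c.toNat : Int) - 65))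
        simp only [List.getD_eq_getElem?_getD, List.getElem?_set] at *
        simp_all
        omega
      · have := hk k
        simp only [List.getD_eq_getElem?_getD, List.getElem?_set] at *
        simp_all
    obtain ⟨cnt', p', e1, e2, hr'⟩ :=
      pvStage1_aux cs (fun x hx => h x (List.mem_cons_of_mem _ hx)) _ _ hrec
    refine ⟨cnt', p', ?_, ?_, hr'⟩
    · simp only [List.foldl_cons, Option.bind_some, pvGet_26 cnt hla _ h1 h2 (0 : Int),
        pvSet_26 cnt hla _ h1 h2 (cnt.getD (pvNorm ((c.toNat : Int) - 65)) 0 + 1)]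
      exact e1
    · simp only [List.foldl_cons, Option.bind_some, pvSet_26 p hlp _ h1 h2 true]
      exact e2

lemma pvStage1 (cs : List Char) (h : ∀ c ∈ cs, 39 ≤ c.toNat ∧ c.toNat ≤ 90) :
    ∃ cnt p, pvACount cs = some cnt ∧ pvBPresent cs = some p ∧ pvRel cnt p := by
  unfold pvACount pvBPresent
  exact pvStage1_aux cs h (List.replicate 26 0) (List.replicate 26 false)
    ⟨by simp, by simp, fun k => by
      constructor
      · simp only [List.getD_eq_getElem?_getD, List.getElem?_replicate]
        split <;> simp
      · simp only [List.getD_eq_getElem?_getD, List.getElem?_replicate]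
        split <;> simp⟩

-- a-array characterisation
lemma pvBuildA_aux (cnt : List Int) (m : Nat) (hm : m ≤ 26) :
    ((PySem.List.pyRange 0 (m : Int) 1).foldl
        (fun a i => if PySem.List.pyGetD cnt i 0 > 0 then
            PySem.List.pySetD a i (Char.ofNat (65 + i).toNat) else a)
        (List.replicate 26 '#')).length = 26 ∧
      ∀ k, ((PySem.List.pyRange 0 (m : Int) 1).foldl
        (fun a i => if PySem.List.pyGetD cnt i 0 > 0 then
            PySem.List.pySetD a i (Char.ofNat (65 + i).toNat) else a)
        (List.replicate 26 '#')).getD k '#' =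
          if k < m ∧ 0 < cnt.getD k 0 then Char.ofNat (65 + k) else '#' := by
  induction m with
  | zero =>
    rw [show ((0 : Nat) : Int) = 0 from rfl, PySem.List.pyRange_one_eq_nil (by norm_num),
      List.foldl_nil]
    refine ⟨by simp, fun k => ?_⟩
    simp only [List.getD_eq_getElem?_getD, List.getElem?_replicate]
    split <;> simp
  | succ m ih =>
    obtain ⟨hl, hs⟩ := ih (by omega)
    have hcast : ((m + 1 : Nat) : Int) = (m : Int) + 1 := by push_cast; ring
    rw [hcast, PySem.List.pyRange_one_succ_right (by positivity), List.foldl_append,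
      List.foldl_cons, List.foldl_nil]
    have hget : PySem.List.pyGetD cnt ((m : Int)) 0 = cnt.getD m 0 :=
      PySem.List.pyGetD_natCast cnt m 0
    by_cases hc : 0 < cnt.getD m 0
    · rw [if_pos (by rw [hget]; exact hc)]
      rw [PySem.List.pySetD_natCast]
      refine ⟨by rw [List.length_set]; exact hl, fun k => ?_⟩
      by_cases hkm : m = k
      · subst hkm
        rw [List.getD_eq_getElem?_getD, List.getElem?_set, if_pos rfl, if_pos (by omega)]
        have h65 : ((65 : Int) + (m : Int)).toNat = 65 + m := by omega
        rw [List.getD_eq_getElem?_getD] at hc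
        simp [h65, hc]
      · rw [List.getD_eq_getElem?_getD, List.getElem?_set, if_neg hkm,
          ← List.getD_eq_getElem?_getD, hs k]
        by_cases hk : k < m
        · simp [hk, show k < m + 1 by omega]
        · simp [hk, show ¬ (k < m + 1) by omega]
    · rw [if_neg (by rw [hget]; exact hc)]
      refine ⟨hl, fun k => ?_⟩
      rw [hs k]
      by_cases hkm : m = k
      · subst hkm
        rw [List.getD_eq_getElem?_getD] at hc
        simp [hc]
      · by_cases hk : k < m
        · simp [hk, show k < m + 1 by omega]
        · simp [hk, show ¬ (k < m + 1) by omega]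

lemma pvBuildA_spec (cnt : List Int) :
    (pvABuildA cnt).length = 26 ∧
      ∀ k, (pvABuildA cnt).getD k '#' =
        if k < 26 ∧ 0 < cnt.getD k 0 then Char.ofNat (65 + k) else '#' := by
  have := pvBuildA_aux cnt 26 (by omega)
  unfold pvABuildA
  exact_mod_cast this

lemma pvGetD_nonneg {α : Type} (xs : List α) (i : Int) (d : α) (h : 0 ≤ i) :
    PySem.List.pyGetD xs i d = xs.getD i.toNat d := by
  simp only [PySem.List.pyGetD, PySem.List.pyGet?, PySem.List.pyIdx?, if_pos h,
    List.getD_eq_getElem?_getD]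
  split
  · rfl
  · rw [List.getElem?_eq_none (by omega)]
    rfl

lemma pvChrNe (k : Nat) (h : k < 26) : Char.ofNat (65 + k) ≠ '#' := by
  interval_cases k <;> decide

-- range(i, -1, -j) for j ≥ 1: empty below zero, else a cons
lemma pvRangeNeg_nil (i j : Int) (hj : 1 ≤ j) (hi : i < 0) :
    PySem.List.pyRange i (-1) (-j) = [] := by
  simp [PySem.List.pyRange, show ¬ ((-j : Int) = 0) by omega,
    show ¬ ((-1:Int) < i) by omega]
  omega

lemma pvRangeNeg_cons (i j : Int) (hj : 1 ≤ j) (hi : 0 ≤ i) :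
    PySem.List.pyRange i (-1) (-j) = i :: PySem.List.pyRange (i - j) (-1) (-j) := by
  have hstep : ¬ ((-j : Int) = 0) := by omega
  have hpos : ¬ ((0:Int) < -j) := by omega
  simp only [PySem.List.pyRange, if_neg hstep, if_neg hpos,
    if_pos (show (-1:Int) < i by omega), neg_neg]
  have hkey : (i - -1 + j - 1) = i + j := by ring
  rw [hkey]
  by_cases hij : j ≤ i - j + j  -- i.e. j ≤ i
  · have hij' : j ≤ i := by omega
    rw [if_pos (show (-1:Int) < i - j by omega)]
    have hkey2 : (i - j - -1 + j - 1) = i := by ring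
    rw [hkey2]
    have hdiv : (i + j) / j = i / j + 1 := by
      have := Int.add_mul_ediv_right i 1 (show j ≠ 0 by omega)
      simpa using this
    have hnn : 0 ≤ i / j := Int.ediv_nonneg hi (by omega)
    rw [hdiv, show (i / j + 1).toNat = (i / j).toNat + 1 by omega, List.range_succ_eq_map]
    rw [List.map_cons, List.map_map]
    congr 1
    · ring
    · apply List.map_congr_left
      intro t _
      simp only [Function.comp]
      push_cast
      ring
  · have hij' : ¬ j ≤ i := by omega
    rw [if_neg (show ¬ ((-1:Int) < i - j) by omega)]
    have hdiv : (i + j) / j = 1 := by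
      have := Int.add_mul_ediv_right i 1 (show j ≠ 0 by omega)
      have h0 : i / j = 0 := Int.ediv_eq_zero_of_lt hi (by omega)
      simpa [h0] using this
    rw [hdiv]
    norm_num

-- once the break flag is set the loop keeps its state
lemma pvBreak_stop (a : List Char) (l : List Int) (acc : List Char) :
    l.foldl (fun (st : List Char × Bool) k =>
      if st.2 then st
      else if PySem.List.pyGetD a k '#' = '#' then (st.1, true)
      else (st.1 ++ [PySem.List.pyGetD a k '#'], false)) (acc, true) = (acc, true) := by
  induction l with
  | nil => rfl
  | cons x l ih => simpa using ih

-- the accumulated prefix factors out of the break loop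
lemma pvBreak_shift (a : List Char) (l : List Int) (pre acc : List Char) :
    l.foldl (fun (st : List Char × Bool) k =>
      if st.2 then st
      else if PySem.List.pyGetD a k '#' = '#' then (st.1, true)
      else (st.1 ++ [PySem.List.pyGetD a k '#'], false)) (pre ++ acc, false) =
    (pre ++ (l.foldl (fun (st : List Char × Bool) k =>
      if st.2 then st
      else if PySem.List.pyGetD a k '#' = '#' then (st.1, true)
      else (st.1 ++ [PySem.List.pyGetD a k '#'], false)) (acc, false)).1,
     (l.foldl (fun (st : List Char × Bool) k =>
      if st.2 then st
      else if PySem.List.pyGetD a k '#' = '#' then (st.1, true)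
      else (st.1 ++ [PySem.List.pyGetD a k '#'], false)) (acc, false)).2) := by
  induction l generalizing acc with
  | nil => simp
  | cons x l ih =>
    simp only [List.foldl_cons]
    by_cases hx : PySem.List.pyGetD a x '#' = '#'
    · simp [hx, pvBreak_stop]
    · simp only [Bool.false_eq_true, ite_false, if_neg hx]
      rw [List.append_assoc]
      exact ih (acc ++ [PySem.List.pyGetD a x '#'])

-- A's run construction equals the rendered DP run length
lemma pvRun_spec (a : List Char) (p : List Bool) (haL : a.length = 26)
    (hsp : ∀ k, a.getD k '#' = if k < 26 ∧ p.getD k false = true then Char.ofNat (65 + k) else '#')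
    (i j : Int) (hi0 : 0 ≤ i) (hi : i < 26) (hj : 1 ≤ j) :
    pvARun a i j = pvRender (pvRL p j.toNat i.toNat) j i := by
  have main : ∀ (n : Nat) (i : Int), i.toNat = n → 0 ≤ i → i < 26 →
      pvARun a i j = pvRender (pvRL p j.toNat i.toNat) j i := by
    intro n
    induction n using Nat.strong_induction_on with
    | _ n ih =>
      intro i hn hi0 hi
      unfold pvARun
      rw [pvRangeNeg_cons i j hj hi0, List.foldl_cons]
      have hga : PySem.List.pyGetD a i '#' = a.getD i.toNat '#' := pvGetD_nonneg _ _ _ hi0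
      by_cases hp : p.getD i.toNat false
      · have hne : a.getD i.toNat '#' = Char.ofNat (65 + i.toNat) := by
          rw [hsp, if_pos ⟨by omega, hp⟩]
        have hch := pvChrNe i.toNat (by omega)
        simp only [Bool.false_eq_true, ite_false, hga, hne, if_neg hch, List.nil_append]
        rw [show ([Char.ofNat (65 + i.toNat)] : List Char)
            = [Char.ofNat (65 + i.toNat)] ++ [] from by simp, pvBreak_shift]
        by_cases hij : j ≤ i
        · have hrec := ih (i - j).toNat (by omega) (i - j) rfl (by omega) (by omega)
          unfold pvARun at hrec
          rw [hrec, show (i - j).toNat = i.toNat - j.toNat from by omega]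
          conv_rhs => rw [pvRL]
          rw [dif_neg (show ¬ j.toNat = 0 by omega), if_pos hp,
            if_pos (show j.toNat ≤ i.toNat by omega), pvRender_succ]
          simp only [List.singleton_append, List.cons.injEq]
          exact ⟨by congr 1; omega, trivial⟩
        · rw [pvRangeNeg_nil (i - j) j hj (by omega), List.foldl_nil]
          conv_rhs => rw [pvRL]
          rw [dif_neg (show ¬ j.toNat = 0 by omega), if_pos hp,
            if_neg (show ¬ j.toNat ≤ i.toNat by omega)]
          simp [pvRender]
          congr 1
          omega
      · have hsharp : PySem.List.pyGetD a i '#' = '#' := by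
          rw [hga, hsp i.toNat, if_neg (fun hc => hp hc.2)]
        simp only [Bool.false_eq_true, ite_false]
        rw [hsharp, if_pos (rfl : ('#' : Char) = '#'), pvBreak_stop]
        conv_rhs => rw [pvRL]
        rw [dif_neg (show ¬ j.toNat = 0 by omega), if_neg hp]
        simp [pvRender]
  exact main i.toNat i rfl hi0 hi

-- B's row characterisation
lemma pvRow_aux (p : List Bool) (j : Int) (hj : 1 ≤ j) (m : Nat) (hm : m ≤ 26) :
    ((PySem.List.pyRange 0 (m : Int) 1).foldl
        (fun row i => if PySem.List.pyGetD p i false then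
            PySem.List.pySetD row i (if j ≤ i then PySem.List.pyGetD row (i - j) 0 + 1 else 1)
          else row)
        (List.replicate 26 (0 : Int))).length = 26 ∧
      ∀ k, ((PySem.List.pyRange 0 (m : Int) 1).foldl
        (fun row i => if PySem.List.pyGetD p i false then
            PySem.List.pySetD row i (if j ≤ i then PySem.List.pyGetD row (i - j) 0 + 1 else 1)
          else row)
        (List.replicate 26 (0 : Int))).getD k 0 =
          if k < m then (pvRL p j.toNat k : Int) else 0 := by
  induction m with
  | zero =>
    rw [show ((0 : Nat) : Int) = 0 from rfl, PySem.List.pyRange_one_eq_nil (by norm_num),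
      List.foldl_nil]
    refine ⟨by simp, fun k => ?_⟩
    simp only [List.getD_eq_getElem?_getD, List.getElem?_replicate]
    split <;> simp
  | succ m ih =>
    obtain ⟨hl, hs⟩ := ih (by omega)
    have hcast : ((m + 1 : Nat) : Int) = (m : Int) + 1 := by push_cast; ring
    rw [hcast, PySem.List.pyRange_one_succ_right (by positivity), List.foldl_append,
      List.foldl_cons, List.foldl_nil]
    have hgetp : PySem.List.pyGetD p ((m : Int)) false = p.getD m false :=
      PySem.List.pyGetD_natCast p m false
    by_cases hpm : p.getD m false
    · rw [if_pos (by rw [hgetp]; exact hpm)]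
      have hval : (if j ≤ (m : Int) then
          PySem.List.pyGetD ((PySem.List.pyRange 0 (m : Int) 1).foldl
            (fun row i => if PySem.List.pyGetD p i false then
                PySem.List.pySetD row i (if j ≤ i then PySem.List.pyGetD row (i - j) 0 + 1 else 1)
              else row)
            (List.replicate 26 (0 : Int))) ((m : Int) - j) 0 + 1 else 1) =
          (pvRL p j.toNat m : Int) := by
        by_cases hjm : j ≤ (m : Int)
        · rw [if_pos hjm, pvGetD_nonneg _ _ _ (by omega), hs]
          rw [if_pos (by omega : ((m : Int) - j).toNat < m)]
          have ht : ((m : Int) - j).toNat = m - j.toNat := by omega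
          rw [ht]
          conv_rhs => rw [pvRL]
          rw [dif_neg (by omega : ¬ j.toNat = 0), if_pos hpm,
            if_pos (by omega : j.toNat ≤ m)]
          push_cast
          ring
        · rw [if_neg hjm, pvRL, dif_neg (by omega : ¬ j.toNat = 0), if_pos hpm,
            if_neg (by omega : ¬ j.toNat ≤ m)]
          norm_num
      rw [hval, PySem.List.pySetD_natCast]
      refine ⟨by rw [List.length_set]; exact hl, fun k => ?_⟩
      by_cases hkm : m = k
      · subst hkm
        rw [List.getD_eq_getElem?_getD, List.getElem?_set, if_pos rfl,
          if_pos (by rw [hl]; omega), if_pos (by omega)]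
        simp
      · rw [List.getD_eq_getElem?_getD, List.getElem?_set, if_neg hkm,
          ← List.getD_eq_getElem?_getD, hs k]
        by_cases hk : k < m
        · simp [hk, show k < m + 1 by omega]
        · simp [hk, show ¬ (k < m + 1) by omega]
    · rw [if_neg (by rw [hgetp]; simpa using hpm)]
      refine ⟨hl, fun k => ?_⟩
      rw [hs k]
      by_cases hkm : m = k
      · subst hkm
        rw [if_neg (by omega : ¬ m < m), if_pos (by omega : m < m + 1)]
        rw [pvRL, dif_neg (by omega : ¬ j.toNat = 0)]
        rw [List.getD_eq_getElem?_getD] at hpm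
        simp [hpm]
      · by_cases hk : k < m
        · simp [hk, show k < m + 1 by omega]
        · simp [hk, show ¬ (k < m + 1) by omega]

lemma pvRow_spec (p : List Bool) (hp : p.length = 26) (j : Int) (hj : 1 ≤ j) :
    ∀ k, (pvBRow p j).getD k 0 = (pvRL p j.toNat k : Int) := by
  intro k
  obtain ⟨hl, hs⟩ := pvRow_aux p j hj 26 (by omega)
  rw [show ((26 : Nat) : Int) = 26 from rfl] at hl hs
  unfold pvBRow
  by_cases hk : k < 26
  · rw [hs k, if_pos hk]
  · rw [List.getD_eq_default _ _ (by rw [hl]; omega)]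
    conv_rhs => rw [pvRL]
    rw [dif_neg (by omega : ¬ j.toNat = 0),
      if_neg (by rw [List.getD_eq_default _ _ (by rw [hp]; omega)]; simp)]
    simp

-- B's table lookup
lemma pvTables_spec (p : List Bool) (j : Int) (hj : 1 ≤ j) (hj2 : j < 26) :
    PySem.List.pyGetD (pvBTables p) j [] = pvBRow p j := by
  unfold pvBTables
  rw [PySem.List.foldl_append_singleton_eq_map, pvGetD_nonneg _ _ _ (by omega),
    List.singleton_append, show j.toNat = (j.toNat - 1) + 1 from by omega,
    List.getD_cons_succ, PySem.List.pyRange_one, List.map_map,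
    List.getD_eq_getElem _ _ (by simp; omega)]
  simp only [List.getElem_map, List.getElem_range, Function.comp]
  congr 1
  omega

-- relation between A's (ans, diff) and B's (best_len, best_j, best_i)
def pvStRel (stA : List Char × Int) (stB : Int × Int × Int) : Prop :=
  stA.1 = pvRender stB.1.toNat stB.2.1 stB.2.2 ∧
    (stA.1.length : Int) = stB.1 ∧ stA.2 = stB.2.1

lemma pvFoldRel {α β γ : Type} (R : α → β → Prop) (f : α → γ → α) (g : β → γ → β)
    (l : List γ) (s : α) (t : β) (hst : R s t)
    (hstep : ∀ s t x, R s t → x ∈ l → R (f s x) (g t x)) :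
    R (l.foldl f s) (l.foldl g t) := by
  induction l generalizing s t with
  | nil => exact hst
  | cons a l ih =>
    exact ih _ _ (hstep _ _ _ hst (by simp)) (fun s t x h hx => hstep _ _ _ h (by simp [hx]))

-- the a-array characterisation, phrased through the presence list
lemma pvASpec (cnt : List Int) (p : List Bool)
    (hk : ∀ k, (0 < cnt.getD k 0 ↔ p.getD k false = true) ∧ 0 ≤ cnt.getD k 0) :
    ∀ k, (pvABuildA cnt).getD k '#' =
      if k < 26 ∧ p.getD k false = true then Char.ofNat (65 + k) else '#' := by
  intro k
  rw [(pvBuildA_spec cnt).2 k]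
  by_cases h1 : k < 26
  · by_cases h2 : p.getD k false = true
    · rw [if_pos ⟨h1, (hk k).1.mpr h2⟩, if_pos ⟨h1, h2⟩]
    · rw [if_neg (fun hc => h2 ((hk k).1.mp hc.2)), if_neg (fun hc => h2 hc.2)]
  · rw [if_neg (fun hc => h1 hc.1), if_neg (fun hc => h1 hc.1)]

-- the selected triple renders to exactly the string A accumulated
lemma pvFinal (SA : List Char × Int) (SB : Int × Int × Int) (h : pvStRel SA SB) :
    String.mk SA.1 = String.mk ((PySem.List.pyRange 0 SB.1 1).map
      (fun t => Char.ofNat (65 + SB.2.2 - t * SB.2.1).toNat)) := by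
  obtain ⟨h1, h2, h3⟩ := h
  obtain ⟨n, hn⟩ : ∃ n : Nat, SB.1 = (n : Int) := ⟨SB.1.toNat, by omega⟩
  rw [hn, Int.toNat_natCast] at h1
  rw [h1, hn, PySem.List.pyRange_zero_natCast, List.map_map]
  rfl

-- ===== VERDICT (by name: the statement is the Claim_ definition above) =====
theorem find_longest_desc_arithmetic_string_spec : Claim_equal_find_longest_desc_arithmetic_string := by
  intro s _ hpre
  unfold Spec_find_longest_desc_arithmetic_string
  have hpre' : ∀ c ∈ s.toList, 39 ≤ c.toNat ∧ c.toNat ≤ 90 := by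
    intro c hc
    have := List.all_eq_true.mp hpre c hc
    simp only [Bool.and_eq_true, decide_eq_true_eq] at this
    exact this
  obtain ⟨cnt, p, hA, hB, hla, hlp, hk⟩ := pvStage1 s.toList hpre' 
  unfold find_longest_desc_arithmetic_string find_longest_desc_arithmetic_string_alt
  rw [hA, hB]
  dsimp only
  unfold pvBSelect
  have hsp := pvASpec cnt p hk
  have haL := (pvBuildA_spec cnt).1
  have hR := pvFoldRel pvStRel
    (fun (st : List Char × Int) i =>
      if PySem.List.pyGetD (pvABuildA cnt) i '#' = '#' then st
      else (PySem.List.pyRange 1 26 1).foldl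
        (fun (st : List Char × Int) j =>
          let c := pvARun (pvABuildA cnt) i j
          if c.length > st.1.length ∨ (c.length = st.1.length ∧ st.2 > j) then (c, j) else st)
        st)
    (fun (st : Int × Int × Int) i =>
      if PySem.List.pyGetD p i false = false then st
      else (PySem.List.pyRange 1 26 1).foldl
        (fun (st : Int × Int × Int) j =>
          let l := PySem.List.pyGetD (PySem.List.pyGetD (pvBTables p) j []) i 0
          if l > st.1 ∨ (l = st.1 ∧ st.2.1 > j) then (l, j, i) else st)
        st)
    (PySem.List.pyRange 25 (-1) (-1)) ([], 2000) (0, 2000, 0)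
    ⟨by simp [pvRender], by simp, rfl⟩
    ?step
  case step =>
    intro sA sB i hst hmem
    dsimp only
    rw [PySem.List.mem_pyRange_neg_one] at hmem
    have hi0 : (0 : Int) ≤ i := by omega
    have hi26 : i < 26 := by omega
    have haI : PySem.List.pyGetD (pvABuildA cnt) i '#' =
        if i.toNat < 26 ∧ p.getD i.toNat false = true then Char.ofNat (65 + i.toNat) else '#' := by
      rw [pvGetD_nonneg _ _ _ hi0, hsp]
    have hpI : PySem.List.pyGetD p i false = p.getD i.toNat false :=
      pvGetD_nonneg _ _ _ hi0
    by_cases hpb : p.getD i.toNat false = true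
    · rw [if_neg (by rw [haI, if_pos ⟨by omega, hpb⟩]; exact pvChrNe i.toNat (by omega)),
        if_neg (by rw [hpI, hpb]; simp)]
      refine pvFoldRel pvStRel _ _ _ _ _ hst ?_
      intro tA tB j htst hjmem
      rw [PySem.List.mem_pyRange_one] at hjmem
      have hj1 : (1 : Int) ≤ j := hjmem.1
      obtain ⟨ht1, ht2, ht3⟩ := htst
      have hcrun : pvARun (pvABuildA cnt) i j = pvRender (pvRL p j.toNat i.toNat) j i :=
        pvRun_spec (pvABuildA cnt) p haL hsp i j hi0 hi26 hj1
      have hlval : PySem.List.pyGetD (PySem.List.pyGetD (pvBTables p) j []) i 0 =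
          (pvRL p j.toNat i.toNat : Int) := by
        rw [pvTables_spec p j hj1 hjmem.2, pvGetD_nonneg _ _ _ hi0, pvRow_spec p hlp j hj1]
      rw [hcrun, hlval]
      set rl := pvRL p j.toNat i.toNat with hrl
      by_cases hc : ((rl : Int) > tB.1 ∨ ((rl : Int) = tB.1 ∧ tB.2.1 > j))
      · rw [if_pos hc, if_pos (by
          rw [pvRender_length, ht3]
          rcases hc with h | h
          · exact Or.inl (by omega)
          · exact Or.inr ⟨by omega, h.2⟩)]
        exact ⟨by rw [Int.toNat_natCast], by rw [pvRender_length], rfl⟩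
      · rw [if_neg hc, if_neg (by
          intro hac
          apply hc
          rw [pvRender_length, ht3] at hac
          rcases hac with h | h
          · exact Or.inl (by omega)
          · exact Or.inr ⟨by omega, h.2⟩)]
        exact ⟨ht1, ht2, ht3⟩
    · rw [if_pos (by rw [haI]; exact if_neg (fun hc => hpb hc.2)),
        if_pos (by rw [hpI]; simpa using hpb)]
      exact hst
  exact pvFinal _ _ hR
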